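-- pv_equiv track=rewrite | github.com/fanzhangg/gomoku-ai | score_counter.py | split_row_by_multi_0
-- ===== SOURCE A (Python) =====
-- def split_row_by_multi_0(frags):
--     """
--     Split the row by 00+
--     :param frags: a list of fragment in the row, each fragment is a list of number representing the stone in the grid
--     :return:
--     """
--     chains = []
--     for row in frags:
--         sub_chains = []
--         li = []
--         is_chain = False
--
--         if not row[0] == 0:
--             li = [2]
--
--         for i in range(len(row)):
--             num = row[i]
--
--             if not is_chain and num == 0:
--                 continue
--             elif not is_chain and not num == 0:
--                 is_chain = True
--
--             if num == 0 and i < len(row) - 1 and row[i+1] == 0: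
--                 sub_chains.append(li)
--                 li = []
--                 is_chain = False
--             elif i == len(row) - 1:
--                 if not num == 0:
--                     li.append(num)
--                     li.append(2)
--                 sub_chains.append(li)
--             else:
--                 li.append(num)
--         chains.extend(sub_chains)
--     return chains
-- ===== SOURCE B (Python) =====
-- def split_row_by_multi_0(frags):
--     chains = []
--     for row in frags:
--         lead = row[0] != 0
--         trail = row[-1] != 0
--         core = _strip_trail(_strip_lead(row))
--         if not core:
--             continue
--         pieces = _split_core(core)
--         if lead:
--             pieces[0] = [2] + pieces[0]
--         if trail:
--             pieces[-1] = pieces[-1] + [2]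
--         chains.extend(pieces)
--     return chains
--
--
-- def _strip_lead(row):
--     while row and row[0] == 0:
--         row = row[1:]
--     return row
--
--
-- def _strip_trail(row):
--     while row and row[-1] == 0:
--         row = row[:-1]
--     return row
--
--
-- def _split_core(core):
--     pieces = []
--     cur = []
--     k = 0
--     while k < len(core):
--         if core[k] == 0 and k + 1 < len(core) and core[k + 1] == 0:
--             pieces.append(cur)
--             cur = []
--             while k < len(core) and core[k] == 0:
--                 k += 1
--         else:
--             cur.append(core[k])
--             k += 1
--     pieces.append(cur)
--     return pieces
-- ===== Notes on version B (the rewrite author's own statement) =====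
-- stated objective: simpler
-- what changed: Replaces A's fused element-by-element state machine (is_chain flag, lookahead, in-loop sentinel placement) by separate passes per fragment: strip leading/trailing zeros, split the core on runs of two-or-more zeros, then attach the 2-sentinels to the first/last chain based on the original row ends.
import Mathlib
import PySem

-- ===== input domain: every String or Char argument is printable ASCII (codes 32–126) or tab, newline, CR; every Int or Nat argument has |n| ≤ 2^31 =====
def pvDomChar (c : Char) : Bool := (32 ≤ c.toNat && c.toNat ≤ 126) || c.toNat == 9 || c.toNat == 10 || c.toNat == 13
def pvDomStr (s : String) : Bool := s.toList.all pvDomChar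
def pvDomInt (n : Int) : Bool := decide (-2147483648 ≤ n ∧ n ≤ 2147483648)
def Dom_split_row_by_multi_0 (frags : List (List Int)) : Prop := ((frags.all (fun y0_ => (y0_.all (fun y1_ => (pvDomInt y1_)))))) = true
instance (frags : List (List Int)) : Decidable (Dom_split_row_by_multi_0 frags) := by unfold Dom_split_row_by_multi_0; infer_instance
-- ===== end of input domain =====

-- B replaces A's one-pass state machine by strip/split/sentinel passes per fragment (objective: simpler); equal on all inputs without empty fragments.

-- ===== PORT A =====
-- inner `for i in range(len(row))` loop of A, carried state (sub_chains, li, is_chain);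
-- the recursion consumes row elements in order, `rest.head?` is Python's row[i+1] lookahead
-- and `rest = []` is Python's `i == len(row) - 1`.
def split_row_by_multi_0_go (sub : List (List Int)) (li : List Int) (isc : Bool) :
    List Int → List (List Int)
  | [] => sub
  | num :: rest =>
    if isc = false ∧ num = 0 then
      split_row_by_multi_0_go sub li isc rest
    else if num = 0 ∧ rest.head? = some 0 then
      split_row_by_multi_0_go (sub ++ [li]) [] false rest
    else if rest = [] then
      sub ++ [if num = 0 then li else li ++ [num, 2]]
    else
      split_row_by_multi_0_go sub (li ++ [num]) true rest

-- one row of A: initial li is [2] iff row[0] != 0 (row[0] on [] raises in Python; Pre_ excludes it)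
def srbmA_row (row : List Int) : List (List Int) :=
  split_row_by_multi_0_go [] (if row.getD 0 0 = 0 then [] else [2]) false row

def split_row_by_multi_0 (frags : List (List Int)) : List (List Int) :=
  frags.foldl (fun chains row => chains ++ srbmA_row row) []

-- ===== PORT B =====
-- `while row and row[0] == 0: row = row[1:]`
def srbm_strip_lead : List Int → List Int
  | [] => []
  | x :: xs => if x = 0 then srbm_strip_lead xs else x :: xs

theorem srbm_strip_lead_length_le (xs : List Int) : (srbm_strip_lead xs).length ≤ xs.length := by
  induction xs with
  | nil => simp [srbm_strip_lead]
  | cons x xs ih =>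
    simp only [srbm_strip_lead]
    split <;> simp <;> omega

-- `while row and row[-1] == 0: row = row[:-1]`
def srbm_strip_trail (xs : List Int) : List Int :=
  if h : xs.getLast? = some 0 then srbm_strip_trail xs.dropLast else xs
termination_by xs.length
decreasing_by
  cases xs with
  | nil => simp at h
  | cons a as => simp [List.length_dropLast]

-- the `while k < len(core)` run scan of _split_core; the inner zero-skip loop is srbm_strip_lead
def srbm_split (cur : List Int) (core : List Int) : List (List Int) :=
  match core with
  | [] => [cur]
  | x :: rest =>
    if x = 0 ∧ rest.head? = some 0 then
      cur :: srbm_split [] (srbm_strip_lead rest)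
    else
      srbm_split (cur ++ [x]) rest
termination_by core.length
decreasing_by
  · have := srbm_strip_lead_length_le rest; simp; omega
  · simp

-- `pieces[0] = pre + pieces[0]`
def srbm_map_first (pre : List Int) : List (List Int) → List (List Int)
  | [] => []
  | p :: ps => (pre ++ p) :: ps

-- `pieces[-1] = pieces[-1] + [2]`
def srbm_add_trail (pieces : List (List Int)) : List (List Int) :=
  pieces.dropLast ++ [pieces.getLast?.getD [] ++ [2]]

-- one row of B (row[0]/row[-1] raise on [] in Python; Pre_ excludes it)
def srbmB_row (row : List Int) : List (List Int) :=
  let lead := row.getD 0 0 ≠ 0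
  let trail := row.getLast?.getD 0 ≠ 0
  let core := srbm_strip_trail (srbm_strip_lead row)
  if core = [] then []
  else
    let pieces := srbm_split [] core
    let pieces := if lead then srbm_map_first [2] pieces else pieces
    if trail then srbm_add_trail pieces else pieces

def split_row_by_multi_0_alt (frags : List (List Int)) : List (List Int) :=
  frags.foldl (fun chains row => chains ++ srbmB_row row) []

-- ===== PRECONDITION & SPEC =====
-- Pre_ excludes inputs containing an empty fragment: there Python A raises IndexError on row[0] (and B likewise).
def Pre_split_row_by_multi_0 (frags : List (List Int)) : Prop := ∀ row ∈ frags, row ≠ []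
instance (frags : List (List Int)) : Decidable (Pre_split_row_by_multi_0 frags) := by
  unfold Pre_split_row_by_multi_0; infer_instance

def pvWitness_split_row_by_multi_0 : List (List Int) := [[1, 0, 0, 2], [0, 1, 0, 1]]

def Spec_split_row_by_multi_0 (frags : List (List Int)) (out : List (List Int)) : Prop := out = split_row_by_multi_0_alt frags
instance (frags : List (List Int)) (out : List (List Int)) : Decidable (Spec_split_row_by_multi_0 frags out) := by unfold Spec_split_row_by_multi_0; infer_instance

-- ===== CLAIM (what is proved, stated in full; the proofs are below) =====
def Claim_equal_split_row_by_multi_0 : Prop := ∀ (frags : List (List Int)), Dom_split_row_by_multi_0 frags → Pre_split_row_by_multi_0 frags → Spec_split_row_by_multi_0 frags (split_row_by_multi_0 frags)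

-- ===== LEMMAS AND PROOFS =====

theorem srbm_go_skip (lz ys : List Int) (sub : List (List Int)) (li : List Int)
    (hz : ∀ z ∈ lz, z = 0) :
    split_row_by_multi_0_go sub li false (lz ++ ys) = split_row_by_multi_0_go sub li false ys := by
  induction lz with
  | nil => rfl
  | cons z zs ih =>
    have hz0 : z = 0 := hz z (by simp)
    subst hz0
    rw [List.cons_append, show split_row_by_multi_0_go sub li false (0 :: (zs ++ ys))
          = split_row_by_multi_0_go sub li false (zs ++ ys) from by simp [split_row_by_multi_0_go]]
    exact ih (fun w hw => hz w (by simp [hw]))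

theorem srbm_go_enter (y : Int) (ys : List Int) (sub : List (List Int)) (li : List Int)
    (hy : y ≠ 0) :
    split_row_by_multi_0_go sub li false (y :: ys) = split_row_by_multi_0_go sub li true (y :: ys) := by
  simp only [split_row_by_multi_0_go]
  simp [hy]

theorem srbm_strip_lead_spec (xs : List Int) :
    ∃ lz, (∀ z ∈ lz, z = 0) ∧ xs = lz ++ srbm_strip_lead xs := by
  induction xs with
  | nil => exact ⟨[], by simp, rfl⟩
  | cons x xt ih =>
    by_cases hx : x = 0
    · obtain ⟨lz, h1, h2⟩ := ih
      refine ⟨x :: lz, ?_, by simp [srbm_strip_lead, hx]; exact h2⟩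
      intro z hzz; rw [List.mem_cons] at hzz
      rcases hzz with h | h
      · exact h.trans hx
      · exact h1 z h
    · exact ⟨[], by simp, by simp [srbm_strip_lead, hx]⟩

theorem srbm_strip_lead_head (xs : List Int) : (srbm_strip_lead xs).head? ≠ some 0 := by
  induction xs with
  | nil => simp [srbm_strip_lead]
  | cons x xt ih =>
    by_cases hx : x = 0
    · simpa [srbm_strip_lead, hx] using ih
    · simp [srbm_strip_lead, hx]

theorem srbm_strip_trail_getLast (xs : List Int) : (srbm_strip_trail xs).getLast? ≠ some 0 := by
  rw [srbm_strip_trail]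
  split
  · exact srbm_strip_trail_getLast xs.dropLast
  · assumption
termination_by xs.length
decreasing_by
  cases xs with
  | nil => simp_all
  | cons a as => simp [List.length_dropLast]

theorem srbm_strip_trail_ex (xs : List Int) :
    ∃ tz, (∀ z ∈ tz, z = 0) ∧ xs = srbm_strip_trail xs ++ tz := by
  rw [srbm_strip_trail]
  split
  next h =>
    obtain ⟨l', rfl⟩ := List.getLast?_eq_some_iff.mp h
    rw [List.dropLast_concat]
    obtain ⟨tz, h1, h2⟩ := srbm_strip_trail_ex l'
    refine ⟨tz ++ [0], ?_, ?_⟩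
    · intro z hz; rw [List.mem_append] at hz
      rcases hz with h | h
      · exact h1 z h
      · simpa using h
    · rw [← List.append_assoc, ← h2]
  next => exact ⟨[], by simp, by simp⟩
termination_by xs.length
decreasing_by
  subst_vars
  simp

theorem srbm_strip_trail_spec (xs : List Int) :
    ∃ tz, (∀ z ∈ tz, z = 0) ∧ xs = srbm_strip_trail xs ++ tz ∧ (srbm_strip_trail xs).getLast? ≠ some 0 := by
  obtain ⟨tz, h1, h2⟩ := srbm_strip_trail_ex xs
  exact ⟨tz, h1, h2, srbm_strip_trail_getLast xs⟩

theorem srbm_map_first_nil_pre (ps : List (List Int)) : srbm_map_first [] ps = ps := by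
  cases ps <;> simp [srbm_map_first]

theorem srbm_map_first_comp (a b : List Int) (ps : List (List Int)) :
    srbm_map_first a (srbm_map_first b ps) = srbm_map_first (a ++ b) ps := by
  cases ps <;> simp [srbm_map_first]

theorem srbm_go_zeros (zs : List Int) (sub : List (List Int)) (li : List Int)
    (hz : ∀ z ∈ zs, z = 0) :
    split_row_by_multi_0_go sub li false zs = sub := by
  have h := srbm_go_skip zs [] sub li hz
  simpa using h

theorem srbm_split_shift_aux (n : Nat) : ∀ (core cur : List Int), core.length ≤ n →
    srbm_split cur core = srbm_map_first cur (srbm_split [] core) := by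
  induction n with
  | zero =>
    intro core cur hlen
    have hcn : core = [] := by cases core with | nil => rfl | cons a b => simp at hlen
    subst hcn
    simp [srbm_split, srbm_map_first]
  | succ n ih =>
    intro core cur hlen
    cases core with
    | nil => simp [srbm_split, srbm_map_first]
    | cons x rest =>
      have hlen' : rest.length ≤ n := by simp at hlen; omega
      by_cases hg : x = 0 ∧ rest.head? = some 0
      · simp only [srbm_split, if_pos hg]
        simp [srbm_map_first]
      · simp only [srbm_split, if_neg hg]
        rw [ih rest (cur ++ [x]) hlen', ih rest ([] ++ [x]) hlen', srbm_map_first_comp]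
        simp

theorem srbm_split_shift (core cur : List Int) :
    srbm_split cur core = srbm_map_first cur (srbm_split [] core) :=
  srbm_split_shift_aux core.length core cur le_rfl

theorem srbm_split_ne_nil_aux (n : Nat) : ∀ (cur core : List Int), core.length ≤ n →
    srbm_split cur core ≠ [] := by
  induction n with
  | zero =>
    intro cur core hlen
    have hcn : core = [] := by cases core with | nil => rfl | cons a b => simp at hlen
    subst hcn; simp [srbm_split]
  | succ n ih =>
    intro cur core hlen
    cases core with
    | nil => simp [srbm_split]
    | cons x rest =>
      have hlen' : rest.length ≤ n := by simp at hlen; omega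
      simp only [srbm_split]
      split
      · simp
      · exact ih (cur ++ [x]) rest hlen'

theorem srbm_split_ne_nil (cur core : List Int) : srbm_split cur core ≠ [] :=
  srbm_split_ne_nil_aux core.length cur core le_rfl

theorem srbm_add_trail_cons (p : List Int) (ps : List (List Int)) (h : ps ≠ []) :
    srbm_add_trail (p :: ps) = p :: srbm_add_trail ps := by
  cases ps with
  | nil => exact absurd rfl h
  | cons q qs => simp [srbm_add_trail, List.getLast?_cons_cons]

theorem srbm_build (n : Nat) : ∀ (xs core tz : List Int) (sub : List (List Int)) (li : List Int),
    xs.length ≤ n → xs = core ++ tz → xs ≠ [] → (∀ z ∈ tz, z = 0) →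
    (core = [] ∨ core.getLast? ≠ some 0) →
    split_row_by_multi_0_go sub li true xs
      = sub ++ (if tz = [] then srbm_add_trail (srbm_map_first li (srbm_split [] core))
                else srbm_map_first li (srbm_split [] core)) := by
  induction n with
  | zero =>
    intro xs core tz sub li hlen hxs hne hz hcl
    cases xs with
    | nil => exact absurd rfl hne
    | cons a b => simp at hlen
  | succ n ih =>
    intro xs core tz sub li hlen hxs hne hz hcl
    cases xs with
    | nil => exact absurd rfl hne
    | cons x rest =>
      have hlen' : rest.length ≤ n := by simp at hlen; omega
      by_cases hx : x = 0
      · subst hx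
        by_cases hh : rest.head? = some 0
        · have hgo : split_row_by_multi_0_go sub li true (0 :: rest)
              = split_row_by_multi_0_go (sub ++ [li]) [] false rest := by
            simp [split_row_by_multi_0_go, hh]
          rw [hgo]
          cases core with
          | nil =>
            have htzeq : tz = (0:Int) :: rest := by simpa using hxs.symm
            subst htzeq
            have hrz : ∀ z ∈ rest, z = 0 := fun z hzz => hz z (by simp [hzz])
            rw [srbm_go_zeros rest _ _ hrz, if_neg (by simp)]
            simp [srbm_split, srbm_map_first]
          | cons c0 c' =>
            rw [List.cons_append] at hxs
            injection hxs with h1 h2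
            subst h2
            have hc0 : c0 = 0 := h1.symm
            subst hc0
            have hcl' : ((0:Int) :: c').getLast? ≠ some 0 := hcl.resolve_left (by simp)
            have hc'ne : c' ≠ [] := by intro h; subst h; simp at hcl'
            obtain ⟨lz, hlz, hc'⟩ := srbm_strip_lead_spec c'
            have hdne : srbm_strip_lead c' ≠ [] := by
              intro hdn
              rw [hdn, List.append_nil] at hc'
              apply hcl'
              have hne2 : ((0:Int) :: c') ≠ [] := by simp
              rw [List.getLast?_eq_getLast_of_ne_nil hne2]
              have hall : ∀ z ∈ (0:Int) :: c', z = 0 := by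
                intro z hzz
                rcases List.mem_cons.mp hzz with h | h
                · exact h
                · exact hlz z (hc' ▸ h)
              rw [hall _ (List.getLast_mem hne2)]
            obtain ⟨y, d2, hyd⟩ : ∃ y d2, srbm_strip_lead c' = y :: d2 := by
              cases hh2 : srbm_strip_lead c' with
              | nil => exact absurd hh2 hdne
              | cons a b => exact ⟨a, b, rfl⟩
            have hy : y ≠ 0 := by
              have h3 := srbm_strip_lead_head c'
              rw [hyd] at h3; simpa using h3
            have hrest : c' ++ tz = lz ++ (srbm_strip_lead c' ++ tz) := by
              conv_lhs => rw [hc']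
              simp [List.append_assoc]
            rw [hrest, srbm_go_skip lz _ _ _ hlz, hyd, List.cons_append,
                srbm_go_enter y _ _ _ hy, ← List.cons_append, ← hyd]
            have hdlast : (srbm_strip_lead c').getLast? ≠ some 0 := by
              intro hcon
              apply hcl'
              have e1 : ((0:Int) :: c').getLast? = c'.getLast? := by
                cases c' with
                | nil => exact absurd rfl hc'ne
                | cons u us => rw [List.getLast?_cons_cons]
              have e2 : c'.getLast? = (srbm_strip_lead c').getLast? := by
                conv_lhs => rw [hc']
                exact List.getLast?_append_of_ne_nil lz hdne
              rw [e1, e2]; exact hcon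
            have hlen2 : (srbm_strip_lead c' ++ tz).length ≤ n := by
              have h4 : (c' ++ tz).length ≤ n := by simpa using hlen'
              have h5 := congrArg List.length hrest
              simp at h4 h5 ⊢
              omega
            rw [ih (srbm_strip_lead c' ++ tz) (srbm_strip_lead c') tz (sub ++ [li]) []
                hlen2 rfl (by rw [hyd]; simp) hz (Or.inr hdlast)]
            have hch : c'.head? = some 0 := by
              cases c' with
              | nil => exact absurd rfl hc'ne
              | cons u us =>
                rw [List.cons_append] at hh
                simpa using hh
            have hsplit : srbm_split [] ((0:Int) :: c') = [] :: srbm_split [] (srbm_strip_lead c') := by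
              simp only [srbm_split]
              rw [if_pos ⟨trivial, hch⟩]
            rw [hsplit]
            have hmf : srbm_map_first li ([] :: srbm_split [] (srbm_strip_lead c'))
                = li :: srbm_split [] (srbm_strip_lead c') := by
              simp [srbm_map_first]
            rw [hmf, srbm_map_first_nil_pre]
            by_cases htz : tz = []
            · rw [if_pos htz, if_pos htz,
                  srbm_add_trail_cons _ _ (srbm_split_ne_nil _ _)]
              simp
            · rw [if_neg htz, if_neg htz]
              simp
        · cases rest with
          | nil =>
            have hcn : core = [] := by
              cases core with
              | nil => rfl
              | cons c0 c' =>
                rw [List.cons_append] at hxs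
                injection hxs with h1 h2
                have hc' : c' = [] := by
                  cases c' with
                  | nil => rfl
                  | cons u us => simp at h2
                subst hc'
                rw [← h1] at hcl
                rcases hcl with h | h
                · simp at h
                · simp at h
            subst hcn
            have htzeq : tz = [(0:Int)] := by simpa using hxs.symm
            subst htzeq
            have hgo : split_row_by_multi_0_go sub li true [(0:Int)] = sub ++ [li] := by
              simp [split_row_by_multi_0_go]
            rw [hgo, if_neg (by simp)]
            simp [srbm_split, srbm_map_first]
          | cons w r2 =>
            have hw : w ≠ 0 := fun h => hh (by simp [h])
            have hgo : split_row_by_multi_0_go sub li true (0 :: w :: r2)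
                = split_row_by_multi_0_go sub (li ++ [0]) true (w :: r2) := by
              conv_lhs => rw [split_row_by_multi_0_go]
              rw [if_neg (by simp), if_neg (by simp [hw]), if_neg (by simp)]
            cases core with
            | nil =>
              exfalso
              apply hw
              apply hz w
              have : tz = 0 :: w :: r2 := by simpa using hxs.symm
              rw [this]; simp
            | cons c0 c' =>
              rw [List.cons_append] at hxs
              injection hxs with h1 h2
              have hc0 : c0 = 0 := h1.symm
              subst hc0
              have hcl' : ((0:Int) :: c').getLast? ≠ some 0 := hcl.resolve_left (by simp)
              have hc'ne : c' ≠ [] := by intro h; subst h; simp at hcl'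
              have hdlast : c'.getLast? ≠ some 0 := by
                intro hcon
                apply hcl'
                cases c' with
                | nil => exact absurd rfl hc'ne
                | cons u us => rw [List.getLast?_cons_cons]; exact hcon
              rw [hgo, ih (w :: r2) c' tz sub (li ++ [0]) hlen' h2 (by simp) hz (Or.inr hdlast)]
              have hch : ¬ ((0:Int) = 0 ∧ c'.head? = some 0) := by
                intro hcc
                apply hw
                cases c' with
                | nil => exact absurd rfl hc'ne
                | cons u us =>
                  rw [List.cons_append] at h2
                  injection h2 with h3 _
                  have : u = (0:Int) := by simpa using hcc.2
                  rw [h3, this]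
              have hsplit : srbm_split [] ((0:Int) :: c') = srbm_split [0] c' := by
                simp only [srbm_split]
                rw [if_neg (fun hcc => hch ⟨rfl, hcc.2⟩)]
                rfl
              rw [hsplit, srbm_split_shift c' [0], srbm_map_first_comp]
      · cases core with
        | nil =>
          exfalso
          apply hx
          apply hz x
          rw [List.nil_append] at hxs
          rw [← hxs]; simp
        | cons c0 c' =>
          rw [List.cons_append] at hxs
          injection hxs with h1 h2
          subst h1
          cases rest with
          | nil =>
            have hc' : c' = [] := by
              cases c' with
              | nil => rfl
              | cons u us => simp at h2
            subst hc'
            have htzeq : tz = [] := by simpa using h2.symm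
            subst htzeq
            have hgo : split_row_by_multi_0_go sub li true [x] = sub ++ [li ++ [x, 2]] := by
              simp [split_row_by_multi_0_go, hx]
            rw [hgo, if_pos rfl]
            have hsp : srbm_split ([] : List Int) [x] = [[x]] := by
              simp [srbm_split, hx]
            rw [hsp]
            simp [srbm_map_first, srbm_add_trail]
          | cons w r2 =>
            have hgo : split_row_by_multi_0_go sub li true (x :: w :: r2)
                = split_row_by_multi_0_go sub (li ++ [x]) true (w :: r2) := by
              conv_lhs => rw [split_row_by_multi_0_go]
              rw [if_neg (by simp [hx]), if_neg (by simp [hx]), if_neg (by simp)]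
            have hcl2 : c' = [] ∨ c'.getLast? ≠ some 0 := by
              cases c' with
              | nil => exact Or.inl rfl
              | cons u us =>
                right
                intro hcon
                exact (hcl.resolve_left (by simp)) (by rw [List.getLast?_cons_cons]; exact hcon)
            rw [hgo, ih (w :: r2) c' tz sub (li ++ [x]) hlen' h2 (by simp) hz hcl2]
            have hsplit : srbm_split [] (x :: c') = srbm_split [x] c' := by
              simp only [srbm_split]
              rw [if_neg (fun hcc => hx hcc.1)]
              rfl
            rw [hsplit, srbm_split_shift c' [x], srbm_map_first_comp]

theorem srbm_row_eq (row : List Int) : srbmA_row row = srbmB_row row := by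
  obtain ⟨lz, hlz, hrow⟩ := srbm_strip_lead_spec row
  obtain ⟨tz, htz, hs, hlast⟩ := srbm_strip_trail_spec (srbm_strip_lead row)
  by_cases hc : srbm_strip_trail (srbm_strip_lead row) = []
  · have hall : ∀ z ∈ row, z = 0 := by
      intro z hzz
      rw [hrow, hs, hc, List.nil_append] at hzz
      rcases List.mem_append.mp hzz with h | h
      · exact hlz z h
      · exact htz z h
    simp only [srbmA_row, srbmB_row]
    rw [if_pos hc]
    exact srbm_go_zeros row _ _ hall
  · obtain ⟨y, c2, hcore⟩ : ∃ y c2, srbm_strip_trail (srbm_strip_lead row) = y :: c2 := by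
      cases h : srbm_strip_trail (srbm_strip_lead row) with
      | nil => exact absurd h hc
      | cons a b => exact ⟨a, b, rfl⟩
    have hy : y ≠ 0 := by
      have h3 := srbm_strip_lead_head row
      rw [hs, hcore, List.cons_append] at h3
      simpa using h3
    simp only [srbmA_row, srbmB_row]
    rw [if_neg hc]
    have hrow2 : row = lz ++ (srbm_strip_trail (srbm_strip_lead row) ++ tz) := by
      rw [← hs, ← hrow]
    set li0 := (if row.getD 0 0 = 0 then ([] : List Int) else [2]) with hli0
    conv_lhs => rw [hrow2]
    rw [srbm_go_skip lz _ _ _ hlz, hcore, List.cons_append, srbm_go_enter y _ _ _ hy,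
        ← List.cons_append, ← hcore,
        srbm_build (srbm_strip_trail (srbm_strip_lead row) ++ tz).length
          (srbm_strip_trail (srbm_strip_lead row) ++ tz)
          (srbm_strip_trail (srbm_strip_lead row)) tz [] li0
          le_rfl rfl (by rw [hcore]; simp) htz (Or.inr hlast), List.nil_append]
    have hmf : srbm_map_first li0
          (srbm_split [] (srbm_strip_trail (srbm_strip_lead row)))
        = if row.getD 0 0 ≠ 0
          then srbm_map_first [2] (srbm_split [] (srbm_strip_trail (srbm_strip_lead row)))
          else srbm_split [] (srbm_strip_trail (srbm_strip_lead row)) := by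
      rw [hli0]
      by_cases hl : row.getD 0 0 = 0
      · rw [if_pos hl, if_neg (not_not_intro hl), srbm_map_first_nil_pre]
      · rw [if_neg hl, if_pos hl]
    rw [hmf]
    by_cases htz2 : tz = []
    · have htr : row.getLast?.getD 0 ≠ 0 := by
        have h4 : row.getLast? = (srbm_strip_trail (srbm_strip_lead row)).getLast? := by
          conv_lhs => rw [hrow2, htz2, List.append_nil]
          exact List.getLast?_append_of_ne_nil lz hc
        rw [h4, hcore, List.getLast?_eq_getLast_of_ne_nil (by simp)]
        intro hcon
        apply hlast
        rw [hcore, List.getLast?_eq_getLast_of_ne_nil (by simp)]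
        simp only [Option.getD_some] at hcon
        rw [hcon]
      rw [if_pos htz2, if_pos htr]
    · have htr : ¬ row.getLast?.getD 0 ≠ 0 := by
        have h4 : row.getLast? = tz.getLast? := by
          conv_lhs => rw [hrow2]
          rw [List.getLast?_append_of_ne_nil lz (by simp [htz2]),
              List.getLast?_append_of_ne_nil _ htz2]
        rw [h4, List.getLast?_eq_getLast_of_ne_nil htz2]
        simp [htz (tz.getLast htz2) (List.getLast_mem htz2)]
      rw [if_neg htz2, if_neg htr]

theorem srbm_fold_eq (frags : List (List Int)) : ∀ acc : List (List Int),
    frags.foldl (fun chains row => chains ++ srbmA_row row) acc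
      = frags.foldl (fun chains row => chains ++ srbmB_row row) acc := by
  intro acc; simp only [srbm_row_eq]

-- ===== VERDICT (by name: the statement is the Claim_ definition above) =====
theorem split_row_by_multi_0_spec : Claim_equal_split_row_by_multi_0 := by
  intro frags _ _
  unfold Spec_split_row_by_multi_0 split_row_by_multi_0 split_row_by_multi_0_alt
  exact srbm_fold_eq frags []
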